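-- pv_equiv track=rewrite | github.com/zruiq6688/Python_2022 | while_loop.py | name_adder
-- ===== SOURCE A (Python) =====
-- def name_adder(lst):
--     i=0
--     new_list = []
--     while i < len(lst):
--         if lst[i] != '':
--             new_list.append(lst[i])
--             i = i+1
--         else :
--             break
--     return new_list
-- ===== SOURCE B (Python) =====
-- def name_adder(lst):
--     try:
--         idx = lst.index('')
--     except ValueError:
--         idx = len(lst)
--     return lst[:idx]
-- ===== Notes on version B (the rewrite author's own statement) =====
-- stated objective: simpler
-- what changed: Replaces the index-driven append-until-break while loop with a two-phase locate-then-slice: find the index of the first '' (falling back to len(lst)) and return lst[:idx].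
import Mathlib
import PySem

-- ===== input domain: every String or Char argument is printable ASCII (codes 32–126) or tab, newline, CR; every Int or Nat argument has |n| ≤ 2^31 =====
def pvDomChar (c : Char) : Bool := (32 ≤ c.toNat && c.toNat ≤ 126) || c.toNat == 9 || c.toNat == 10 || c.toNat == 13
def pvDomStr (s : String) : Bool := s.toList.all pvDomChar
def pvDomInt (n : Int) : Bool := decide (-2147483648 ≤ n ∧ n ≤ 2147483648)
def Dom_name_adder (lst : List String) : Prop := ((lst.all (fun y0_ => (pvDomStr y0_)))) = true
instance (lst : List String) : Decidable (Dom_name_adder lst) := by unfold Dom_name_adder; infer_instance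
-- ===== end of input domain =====

-- B locates the first '' (index, falling back to the length) and slices, instead of A's
-- append-until-break index loop; objective: simpler. Equal return value on all inputs.

-- ===== PORT A =====
-- while i < len(lst): if lst[i] != '': append; i += 1 else: break
def nameAdderLoop (lst : List String) (i : Nat) (acc : List String) : List String :=
  if h : i < lst.length then
    if lst[i] ≠ "" then nameAdderLoop lst (i + 1) (acc ++ [lst[i]])
    else acc
  else acc
termination_by lst.length - i

def name_adder (lst : List String) : List String :=
  nameAdderLoop lst 0 []

-- ===== PORT B =====
-- try: idx = lst.index('') / except ValueError: idx = len(lst); return lst[:idx]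
def name_adder_alt (lst : List String) : List String :=
  let idx : Nat :=
    match PySem.List.index? lst "" with
    | some i => i
    | none => lst.length
  PySem.List.slice lst none (some (idx : Int))

-- ===== PRECONDITION & SPEC =====
def Spec_name_adder (lst : List String) (out : List String) : Prop := out = name_adder_alt lst
instance (lst : List String) (out : List String) : Decidable (Spec_name_adder lst out) := by unfold Spec_name_adder; infer_instance

-- ===== CLAIM (what is proved, stated in full; the proofs are below) =====
def Claim_equal_name_adder : Prop := ∀ (lst : List String), Dom_name_adder lst → Spec_name_adder lst (name_adder lst)

-- ===== LEMMAS AND PROOFS =====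
theorem nameAdderLoop_eq (lst : List String) :
    ∀ i acc, nameAdderLoop lst i acc = acc ++ (lst.drop i).takeWhile (· ≠ "") := by
  intro i acc
  induction i, acc using nameAdderLoop.induct lst with
  | case1 i acc h he ih =>
    have hd : lst.drop i = lst[i] :: lst.drop (i + 1) := List.drop_eq_getElem_cons h
    rw [nameAdderLoop, dif_pos h, if_pos he, ih, hd, List.takeWhile_cons]
    simp [he]
  | case2 i acc h he =>
    have hd : lst.drop i = lst[i] :: lst.drop (i + 1) := List.drop_eq_getElem_cons h
    have he' : lst[i] = "" := by simpa using he
    rw [nameAdderLoop, dif_pos h, if_neg he, hd]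
    simp [he']
  | case3 i acc h =>
    have hnil : lst.drop i = [] := List.drop_eq_nil_of_le (by omega)
    rw [nameAdderLoop, dif_neg h, hnil]
    simp

theorem take_index_eq_takeWhile : ∀ (lst : List String),
    lst.take (match PySem.List.index? lst "" with
              | some i => i
              | none => lst.length) = lst.takeWhile (· ≠ "") := by
  intro lst
  induction lst with
  | nil => simp [PySem.List.index?_eq_idxOf?]
  | cons x xs ih =>
    by_cases hx : x = ""
    · subst hx
      rw [PySem.List.index?_cons_self]
      simp [List.takeWhile]
    · rw [PySem.List.index?_cons_of_ne xs hx]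
      cases hidx : PySem.List.index? xs "" with
      | some i =>
        rw [hidx] at ih
        simp [List.takeWhile, hx, ih]
      | none =>
        rw [hidx] at ih
        simp [List.takeWhile, hx, ih]

theorem alt_eq_takeWhile (lst : List String) :
    name_adder_alt lst = lst.takeWhile (· ≠ "") := by
  unfold name_adder_alt
  rw [PySem.List.slice_to_natCast]
  exact take_index_eq_takeWhile lst

-- ===== VERDICT (by name: the statement is the Claim_ definition above) =====
theorem name_adder_spec : Claim_equal_name_adder := by
  intro lst _
  unfold Spec_name_adder name_adder
  rw [nameAdderLoop_eq, alt_eq_takeWhile]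
  simp
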